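-- pv_equiv track=rewrite | github.com/AM208vn/Tinhoc | file1/bai2.py | tim_uoc_chung_lon_nhat
-- ===== SOURCE A (Python) =====
-- def tim_uoc_chung_lon_nhat(arr):
--     uoc_chung_lon_nhat = 0
--     for i in range(len(arr)):
--         dem = 0
--         for j in range(len(arr)):
--             if arr[j] % arr[i] == 0:
--                 dem += 1
--         if dem == len(arr) - 1 and arr[i] > uoc_chung_lon_nhat:
--             uoc_chung_lon_nhat = arr[i]
--     return uoc_chung_lon_nhat
-- ===== SOURCE B (Python) =====
-- def tim_uoc_chung_lon_nhat(arr):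
--     # Divisor-sieve: instead of testing every candidate against every element,
--     # enumerate the divisors of each element once (trial division up to sqrt)
--     # and accumulate counts for the candidates present in the array.
--     n = len(arr)
--     cand = set(arr)
--     cnt = {}
--     for x in arr:
--         m = abs(x)
--         divs = set()
--         d = 1
--         while d * d <= m:
--             if m % d == 0:
--                 divs.add(d)
--                 divs.add(m // d)
--             d += 1
--         for d in divs:
--             if d in cand:
--                 cnt[d] = cnt.get(d, 0) + 1
--             if -d in cand:
--                 cnt[-d] = cnt.get(-d, 0) + 1
--     best = 0
--     for v in cand:
--         if cnt.get(v, 0) == n - 1 and v > best: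
--             best = v
--     return best
-- ===== Notes on version B (the rewrite author's own statement) =====
-- stated objective: faster
-- what changed: Replaces A's candidate-by-element double scan (every element tried as a modulus against every element, O(n^2) divisions) by a divisor sieve: each element's divisors are enumerated once by trial division up to its square root and accumulated into a per-candidate counter, so no candidate is ever tested against the elements.
import Mathlib
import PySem

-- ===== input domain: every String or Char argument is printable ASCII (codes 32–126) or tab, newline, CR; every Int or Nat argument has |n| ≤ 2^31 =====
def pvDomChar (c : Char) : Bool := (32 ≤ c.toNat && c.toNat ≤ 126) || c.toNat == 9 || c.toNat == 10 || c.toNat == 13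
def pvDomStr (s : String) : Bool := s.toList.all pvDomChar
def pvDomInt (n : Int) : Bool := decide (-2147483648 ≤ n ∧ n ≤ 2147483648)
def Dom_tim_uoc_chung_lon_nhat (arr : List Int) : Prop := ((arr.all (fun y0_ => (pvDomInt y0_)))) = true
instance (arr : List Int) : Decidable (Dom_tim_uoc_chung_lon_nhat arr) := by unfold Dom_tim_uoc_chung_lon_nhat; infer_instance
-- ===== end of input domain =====

-- B replaces A's O(n^2) candidate-by-element double scan by a divisor sieve: each element's divisors
-- are enumerated once by trial division up to its square root and counts accumulated per candidate
-- (measurably faster on the generated timing inputs).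


-- ===== PORT A =====
-- arr[i]/arr[j] are only indexed inside range(len(arr)), so pyGetD with default 0 is exact;
-- '%' is PySem.Int.mod (Python floor semantics; a zero divisor raises in Python — see Pre_).
def tim_uoc_chung_lon_nhat (arr : List Int) : Int :=
  (PySem.List.pyRange 0 (arr.length : Int) 1).foldl (fun uoc i =>
    let ai := PySem.List.pyGetD arr i 0
    let dem := (PySem.List.pyRange 0 (arr.length : Int) 1).foldl (fun dem j =>
      if PySem.Int.mod (PySem.List.pyGetD arr j 0) ai = 0 then dem + 1 else dem) 0
    if dem = (arr.length : Int) - 1 ∧ ai > uoc then ai else uoc) 0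

-- ===== PORT B =====
-- the 'while d * d <= m' trial-division loop; fuel only makes it total: m.toNat + 1 iterations
-- always suffice because the loop body requires d ≤ d*d ≤ m and d starts at 1.
def pvDivLoop (m : Int) : Nat → Int → PySem.Set Int → PySem.Set Int
  | 0, _, divs => divs
  | fuel + 1, d, divs =>
    if d * d ≤ m then
      pvDivLoop m fuel (d + 1)
        (if PySem.Int.mod m d = 0 then
          PySem.Set.add (PySem.Set.add divs d) (PySem.Int.floordiv m d)
        else divs)
    else divs

-- the body of 'for d in divs: if d in cand: … ; if -d in cand: …'
def pvUpdateCnt (cand : PySem.Set Int) (cnt : PySem.Dict Int Int) (d : Int) : PySem.Dict Int Int :=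
  let cnt1 := if PySem.Set.contains cand d then cnt.insert d (cnt.getD d 0 + 1) else cnt
  if PySem.Set.contains cand (-d) then cnt1.insert (-d) (cnt1.getD (-d) 0 + 1) else cnt1

def tim_uoc_chung_lon_nhat_alt (arr : List Int) : Int :=
  let n : Int := arr.length
  let cand : PySem.Set Int := PySem.Set.ofList arr
  let cnt : PySem.Dict Int Int := arr.foldl (fun cnt x =>
      let m := |x|
      let divs := pvDivLoop m (m.toNat + 1) 1 PySem.Set.empty
      divs.foldl (pvUpdateCnt cand) cnt) PySem.Dict.empty
  cand.foldl (fun best v => if cnt.getD v 0 = n - 1 ∧ v > best then v else best) 0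

-- ===== PRECONDITION & SPEC =====
-- Python A raises ZeroDivisionError (arr[j] % 0) as soon as arr contains 0; those inputs are excluded.
def Pre_tim_uoc_chung_lon_nhat (arr : List Int) : Prop := (0 : Int) ∉ arr
instance (arr : List Int) : Decidable (Pre_tim_uoc_chung_lon_nhat arr) := by unfold Pre_tim_uoc_chung_lon_nhat; infer_instance
def pvWitness_tim_uoc_chung_lon_nhat : List Int := [6, 2, 3, 2]
def Spec_tim_uoc_chung_lon_nhat (arr : List Int) (out : Int) : Prop := out = tim_uoc_chung_lon_nhat_alt arr
instance (arr : List Int) (out : Int) : Decidable (Spec_tim_uoc_chung_lon_nhat arr out) := by unfold Spec_tim_uoc_chung_lon_nhat; infer_instance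

-- ===== CLAIM (what is proved, stated in full; the proofs are below) =====
def Claim_equal_tim_uoc_chung_lon_nhat : Prop := ∀ (arr : List Int), Dom_tim_uoc_chung_lon_nhat arr → Pre_tim_uoc_chung_lon_nhat arr → Spec_tim_uoc_chung_lon_nhat arr (tim_uoc_chung_lon_nhat arr)

-- ===== LEMMAS AND PROOFS =====

theorem pv_le_mul_self (a : Int) : a ≤ a * a := by
  by_cases h : a ≤ 0
  · exact le_trans h (mul_self_nonneg a)
  · nlinarith

-- what the trial-division loop has still to collect from trial divisor d on
def pvColl (m d x : Int) : Prop :=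
  ∃ e, d ≤ e ∧ e * e ≤ m ∧ PySem.Int.mod m e = 0 ∧ (x = e ∨ x = PySem.Int.floordiv m e)

theorem pv_mem_pvDivLoop (m : Int) (fuel : Nat) (d : Int) (s : PySem.Set Int) (x : Int)
    (hd : 1 ≤ d) (hfuel : (m + 1 - d).toNat ≤ fuel) :
    x ∈ pvDivLoop m fuel d s ↔ x ∈ s ∨ pvColl m d x := by
  induction fuel generalizing d s with
  | zero =>
    simp only [pvDivLoop]
    have hcoll : ¬ pvColl m d x := by
      rintro ⟨e, hde, hee, _, _⟩
      have h2 : e ≤ e * e := pv_le_mul_self e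
      omega
    tauto
  | succ fuel ih =>
    simp only [pvDivLoop]
    by_cases hdd : d * d ≤ m
    · have hdm : d ≤ m := le_trans (pv_le_mul_self d) hdd
      rw [if_pos hdd, ih (d + 1) _ (by omega) (by omega)]
      have hsplit : ∀ y, pvColl m d y ↔
          (PySem.Int.mod m d = 0 ∧ (y = d ∨ y = PySem.Int.floordiv m d)) ∨ pvColl m (d + 1) y := by
        intro y
        constructor
        · rintro ⟨e, hde, hee, hmod, hy⟩
          rcases eq_or_lt_of_le hde with rfl | hlt
          · exact Or.inl ⟨hmod, hy⟩
          · exact Or.inr ⟨e, by omega, hee, hmod, hy⟩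
        · rintro (⟨hmod, hy⟩ | ⟨e, hde, hee, hmod, hy⟩)
          · exact ⟨d, le_refl d, hdd, hmod, hy⟩
          · exact ⟨e, by omega, hee, hmod, hy⟩
      rw [hsplit x]
      by_cases hmod : PySem.Int.mod m d = 0
      · rw [if_pos hmod]
        simp only [PySem.Set.mem_add]
        tauto
      · rw [if_neg hmod]
        have : ¬ (PySem.Int.mod m d = 0 ∧ (x = d ∨ x = PySem.Int.floordiv m d)) := fun h => hmod h.1
        tauto
    · rw [if_neg hdd]
      have hcoll : ¬ pvColl m d x := by
        rintro ⟨e, hde, hee, _, _⟩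
        have h2 : d * d ≤ e * e := mul_le_mul hde hde (by omega) (by omega)
        omega
      tauto

theorem pv_nodup_pvDivLoop (m : Int) (fuel : Nat) (d : Int) (s : PySem.Set Int)
    (hs : s.Nodup) : (pvDivLoop m fuel d s).Nodup := by
  induction fuel generalizing d s with
  | zero => exact hs
  | succ fuel ih =>
    simp only [pvDivLoop]
    by_cases hdd : d * d ≤ m
    · rw [if_pos hdd]
      apply ih
      by_cases hmod : PySem.Int.mod m d = 0
      · rw [if_pos hmod]
        exact PySem.Set.nodup_add _ _ (PySem.Set.nodup_add _ _ hs)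
      · rw [if_neg hmod]
        exact hs
    · rw [if_neg hdd]
      exact hs

-- characterisation of the collected divisor set: the positive divisors of m (for 1 ≤ m)
theorem pv_mem_divs (m x : Int) (hm : 1 ≤ m) :
    x ∈ pvDivLoop m (m.toNat + 1) 1 PySem.Set.empty ↔ 1 ≤ x ∧ x ∣ m := by
  rw [pv_mem_pvDivLoop m _ 1 _ x (le_refl 1) (by omega)]
  constructor
  · rintro (h | ⟨e, hde, hee, hmod, hy⟩)
    · simp [PySem.Set.empty] at h
    · have he1 : 1 ≤ e := hde
      have hedvd : e ∣ m := (PySem.Int.mod_eq_zero_iff_dvd m e).mp hmod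
      obtain ⟨k, hk⟩ := hedvd
      have hk1 : 1 ≤ k := by nlinarith
      have hfd : PySem.Int.floordiv m e = k := by
        rw [PySem.Int.floordiv_eq_ediv_of_pos (by omega), hk, Int.mul_ediv_cancel_left k (by omega)]
      rcases hy with rfl | rfl
      · exact ⟨he1, ⟨k, hk⟩⟩
      · rw [hfd]
        exact ⟨hk1, ⟨e, by rw [hk]; ring⟩⟩
  · rintro ⟨hx1, hxdvd⟩
    right
    obtain ⟨k, hk⟩ := hxdvd
    have hk1 : 1 ≤ k := by nlinarith
    by_cases hxx : x * x ≤ m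
    · exact ⟨x, hx1, hxx, (PySem.Int.mod_eq_zero_iff_dvd m x).mpr ⟨k, hk⟩, Or.inl rfl⟩
    · refine ⟨k, hk1, by nlinarith, (PySem.Int.mod_eq_zero_iff_dvd m k).mpr ⟨x, by rw [hk]; ring⟩, Or.inr ?_⟩
      rw [PySem.Int.floordiv_eq_ediv_of_pos (by omega), hk, mul_comm, Int.mul_ediv_cancel_left x (by omega)]

-- one step of the inner 'for d in divs' loop, seen from a fixed candidate v
theorem pv_updateCnt_getD (cand : PySem.Set Int) (cnt : PySem.Dict Int Int) (d v : Int)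
    (hv : v ∈ cand) (hv0 : v ≠ 0) (hd : 1 ≤ d) :
    (pvUpdateCnt cand cnt d).getD v 0 = cnt.getD v 0 + (if d = |v| then 1 else 0) := by
  unfold pvUpdateCnt
  by_cases hvp : 0 < v
  · have habs : |v| = v := abs_of_pos hvp
    rw [habs]
    by_cases hdv : d = v
    · subst hdv
      have hmem : PySem.Set.contains cand d = true := by
        rw [PySem.Set.contains_iff]; exact hv
      have hne : d ≠ -d := by omega
      simp only [hmem, if_true]
      split_ifs with h1 <;> simp [PySem.Dict.getD_insert, hne]
    · have hne1 : v ≠ d := fun h => hdv h.symm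
      have hne2 : v ≠ -d := by omega
      rw [if_neg hdv]
      split_ifs with h1 h2 h3 <;> simp [PySem.Dict.getD_insert, hne1, hne2]
  · have hvn : v < 0 := by omega
    have habs : |v| = -v := abs_of_neg hvn
    rw [habs]
    by_cases hdv : d = -v
    · have hdveq : -d = v := by omega
      have hmem : PySem.Set.contains cand (-d) = true := by
        rw [PySem.Set.contains_iff, hdveq]; exact hv
      have hnev : v ≠ d := by omega
      have hmemv : PySem.Set.contains cand v = true := by
        rw [PySem.Set.contains_iff]; exact hv
      rw [if_pos hdv]
      simp only [hdveq, hmemv, if_true]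
      split_ifs with h1 <;> simp [PySem.Dict.getD_insert, hnev]
    · have hne1 : v ≠ d := by omega
      have hne2 : v ≠ -d := fun h => hdv (by omega)
      rw [if_neg hdv]
      split_ifs with h1 h2 h3 <;> simp [PySem.Dict.getD_insert, hne1, hne2]

-- the whole inner loop adds the multiplicity of |v| in divs
theorem pv_fold_updateCnt (cand : PySem.Set Int) (v : Int) (hv : v ∈ cand) (hv0 : v ≠ 0) :
    ∀ (L : List Int) (cnt : PySem.Dict Int Int), (∀ d ∈ L, 1 ≤ d) →
    (L.foldl (pvUpdateCnt cand) cnt).getD v 0 = cnt.getD v 0 + (L.count |v| : Int) := by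
  intro L
  induction L with
  | nil => simp
  | cons d t ih =>
    intro cnt hpos
    rw [List.foldl_cons, ih _ (fun e he => hpos e (List.mem_cons_of_mem d he)),
      pv_updateCnt_getD cand cnt d v hv hv0 (hpos d (List.mem_cons_self))]
    rw [List.count_cons]
    by_cases h : d = |v|
    · simp [h]
      ring
    · simp [h]

-- the counting dict agrees with A's inner counting loop on every nonzero candidate
theorem pv_cnt_eq_countP (cand : PySem.Set Int) (v : Int) (hv : v ∈ cand) (hv0 : v ≠ 0) :
    ∀ (arr : List Int) (cnt : PySem.Dict Int Int), (0 : Int) ∉ arr →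
    ((arr.foldl (fun cnt x =>
        let m := |x|
        let divs := pvDivLoop m (m.toNat + 1) 1 PySem.Set.empty
        divs.foldl (pvUpdateCnt cand) cnt) cnt).getD v 0)
      = cnt.getD v 0 + (arr.countP (fun x => decide (PySem.Int.mod x v = 0)) : Int) := by
  intro arr
  induction arr with
  | nil => simp
  | cons x t ih =>
    intro cnt h0
    have hx0 : x ≠ 0 := fun h => h0 (h ▸ List.mem_cons_self)
    have hm1 : (1 : Int) ≤ |x| := by have := abs_pos.mpr hx0; omega
    rw [List.foldl_cons, ih _ (fun h => h0 (List.mem_cons_of_mem x h))]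
    have hstep := pv_fold_updateCnt cand v hv hv0
      (pvDivLoop |x| (|x|.toNat + 1) 1 PySem.Set.empty) cnt
      (fun d hd => ((pv_mem_divs |x| d hm1).mp hd).1)
    simp only [hstep]
    have hnd := pv_nodup_pvDivLoop |x| (|x|.toNat + 1) 1 PySem.Set.empty List.nodup_nil
    have hcnt : ((pvDivLoop |x| (|x|.toNat + 1) 1 PySem.Set.empty).count |v| : Int)
        = if PySem.Int.mod x v = 0 then 1 else 0 := by
      have hiff : |v| ∈ pvDivLoop |x| (|x|.toNat + 1) 1 PySem.Set.empty ↔ PySem.Int.mod x v = 0 := by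
        rw [pv_mem_divs |x| |v| hm1, PySem.Int.mod_eq_zero_iff_dvd]
        have h1v : (1 : Int) ≤ |v| := by have := abs_pos.mpr hv0; omega
        simp [h1v, dvd_abs, abs_dvd]
      by_cases h : PySem.Int.mod x v = 0
      · rw [if_pos h]
        exact_mod_cast List.count_eq_one_of_mem hnd (hiff.mpr h)
      · rw [if_neg h]
        exact_mod_cast List.count_eq_zero_of_not_mem (fun hm => h (hiff.mp hm))
    rw [hcnt, List.countP_cons]
    by_cases h : PySem.Int.mod x v = 0
    · simp [h]
      ring
    · simp [h]

-- running max over a list, as needed for the final selection step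
theorem pv_foldl_max_le_iff (l : List Int) (a c : Int) :
    l.foldl max a ≤ c ↔ a ≤ c ∧ ∀ x ∈ l, x ≤ c := by
  induction l generalizing a with
  | nil => simp
  | cons y t ih => simp [List.foldl_cons, ih]; tauto

theorem pv_foldl_max_congr (l₁ l₂ : List Int) (a : Int)
    (h : ∀ x, x ∈ l₁ ↔ x ∈ l₂) : l₁.foldl max a = l₂.foldl max a := by
  refine le_antisymm ?_ ?_ <;>
    rw [pv_foldl_max_le_iff] <;>
    refine ⟨((pv_foldl_max_le_iff _ a _).mp le_rfl).1, fun x hx => ?_⟩ <;>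
    exact ((pv_foldl_max_le_iff _ a _).mp le_rfl).2 x (by rw [h] at *; assumption)

-- selection step rewritten as a conditional max (valid since 'v > best' only matters upward)
theorem pv_step_eq_max (C : Int → Prop) [DecidablePred C] (l : List Int) :
    l.foldl (fun best v => if C v ∧ v > best then v else best) 0
      = (l.filter (fun v => decide (C v))).foldl max 0 := by
  have h1 : l.foldl (fun best v => if C v ∧ v > best then v else best) 0
      = l.foldl (fun best v => if C v then max best v else best) 0 :=
    PySem.List.foldl_congr_mem _ _ _ _ (by
      intro acc x _
      by_cases h : C x
      · by_cases h2 : x > acc <;> simp [h, h2, max_def] <;> omega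
      · simp [h])
  rw [h1, PySem.List.foldl_ite_eq_foldl_filter]

-- A's normal form: a fold over the array of values
theorem pv_A_eq (arr : List Int) :
    tim_uoc_chung_lon_nhat arr
      = arr.foldl (fun best v =>
          if (arr.countP (fun x => decide (PySem.Int.mod x v = 0)) : Int) = (arr.length : Int) - 1 ∧ v > best
          then v else best) 0 := by
  unfold tim_uoc_chung_lon_nhat
  rw [PySem.List.foldl_pyRange_zero_pyGetD' arr 0
      (fun best ai =>
        if (PySem.List.pyRange 0 (arr.length : Int) 1).foldl (fun dem j =>
              if PySem.Int.mod (PySem.List.pyGetD arr j 0) ai = 0 then dem + 1 else dem) 0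
            = (arr.length : Int) - 1 ∧ ai > best
        then ai else best) 0]
  refine PySem.List.foldl_congr_mem _ _ _ _ ?_
  intro acc v _
  rw [PySem.List.foldl_pyRange_zero_pyGetD' arr 0
      (fun dem x => if PySem.Int.mod x v = 0 then dem + 1 else dem) 0,
    PySem.List.foldl_ite_add_one]
  norm_num

-- B's normal form: the same selection fold over the distinct values
theorem pv_B_eq (arr : List Int) (h0 : (0 : Int) ∉ arr) :
    tim_uoc_chung_lon_nhat_alt arr
      = (PySem.Set.ofList arr).foldl (fun best v =>
          if (arr.countP (fun x => decide (PySem.Int.mod x v = 0)) : Int) = (arr.length : Int) - 1 ∧ v > best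
          then v else best) 0 := by
  unfold tim_uoc_chung_lon_nhat_alt
  refine PySem.List.foldl_congr_mem _ _ _ _ ?_
  intro acc v hv
  have hv' : v ∈ arr := (PySem.Set.mem_ofList arr v).mp hv
  have hv0 : v ≠ 0 := fun h => h0 (h ▸ hv')
  rw [pv_cnt_eq_countP (PySem.Set.ofList arr) v hv hv0 arr PySem.Dict.empty h0]
  simp

-- ===== VERDICT (by name: the statement is the Claim_ definition above) =====
theorem tim_uoc_chung_lon_nhat_spec : Claim_equal_tim_uoc_chung_lon_nhat := by
  intro arr _ hpre
  unfold Spec_tim_uoc_chung_lon_nhat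
  rw [pv_A_eq, pv_B_eq arr hpre,
    pv_step_eq_max (fun v => (arr.countP (fun x => decide (PySem.Int.mod x v = 0)) : Int) = (arr.length : Int) - 1) arr,
    pv_step_eq_max (fun v => (arr.countP (fun x => decide (PySem.Int.mod x v = 0)) : Int) = (arr.length : Int) - 1) (PySem.Set.ofList arr)]
  refine pv_foldl_max_congr _ _ 0 (fun x => ?_)
  simp [List.mem_filter, PySem.Set.mem_ofList]
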